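-- pv_equiv track=rewrite | github.com/Jess-June/doomedDiceChall | dice.py | sum_combinations
-- ===== SOURCE A (Python) =====
-- def sum_combinations(die_a, die_b):
--     sums = dict()
--     for a in die_a:
--         for b in die_b:
--             s = a + b
--             if s in sums:
--                 sums[s] += 1
--             else:
--                 sums[s] = 1
--     return sums
-- ===== SOURCE B (Python) =====
-- def sum_combinations(die_a, die_b):
--     ca = {}
--     for a in die_a:
--         ca[a] = ca.get(a, 0) + 1
--     cb = {}
--     for b in die_b:
--         cb[b] = cb.get(b, 0) + 1
--     sums = {}
--     for va, na in ca.items():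
--         for vb, nb in cb.items():
--             s = va + vb
--             sums[s] = sums.get(s, 0) + na * nb
--     return sums
-- ===== Notes on version B (the rewrite author's own statement) =====
-- stated objective: alternative
-- what changed: Instead of A's nested loop over every element pair with an if-in/else dict increment, B first tallies each die into a value->count table and then loops only over the distinct (value, count) pairs, adding the product of multiplicities per distinct sum; the pass over all n*m pairs is traded for one over distinct value pairs (cheaper on duplicate-heavy dice, same order of cost when all values are distinct).
import Mathlib
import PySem

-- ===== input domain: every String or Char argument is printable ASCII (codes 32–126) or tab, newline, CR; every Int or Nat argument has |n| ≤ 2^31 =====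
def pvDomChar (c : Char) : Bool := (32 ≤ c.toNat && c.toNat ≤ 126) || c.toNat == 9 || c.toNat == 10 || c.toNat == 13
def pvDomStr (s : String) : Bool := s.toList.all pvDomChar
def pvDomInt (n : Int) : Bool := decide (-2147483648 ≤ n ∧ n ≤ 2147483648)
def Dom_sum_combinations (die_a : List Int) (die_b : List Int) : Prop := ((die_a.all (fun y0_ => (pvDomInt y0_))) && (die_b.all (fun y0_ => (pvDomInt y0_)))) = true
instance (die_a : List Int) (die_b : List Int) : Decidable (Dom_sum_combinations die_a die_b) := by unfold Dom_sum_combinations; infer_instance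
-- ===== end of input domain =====

-- B replaces A's nested loop over all element pairs by count tables: tally die_a and die_b
-- once, then loop over distinct (value, count) pairs only, adding products of multiplicities
-- (objective: alternative — it trades the pass over all pairs for a pass over distinct pairs).

-- ===== PORT A =====
def sum_combinations (die_a : List Int) (die_b : List Int) : List (Int × Int) :=
  (die_a.foldl (fun sums a =>
    die_b.foldl (fun sums b =>
      let s := a + b
      if PySem.Dict.contains sums s then
        PySem.Dict.insert sums s (PySem.Dict.getD sums s 0 + 1)
      else
        PySem.Dict.insert sums s 1) sums) PySem.Dict.empty).items

-- ===== PORT B =====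
def sum_combinations_alt (die_a : List Int) (die_b : List Int) : List (Int × Int) :=
  let ca := die_a.foldl (fun d a => PySem.Dict.insert d a (PySem.Dict.getD d a 0 + 1)) PySem.Dict.empty
  let cb := die_b.foldl (fun d b => PySem.Dict.insert d b (PySem.Dict.getD d b 0 + 1)) PySem.Dict.empty
  (ca.items.foldl (fun sums p =>
    cb.items.foldl (fun sums q =>
      let s := p.1 + q.1
      PySem.Dict.insert sums s (PySem.Dict.getD sums s 0 + p.2 * q.2)) sums) PySem.Dict.empty).items

-- ===== PRECONDITION & SPEC =====
def Spec_sum_combinations (die_a : List Int) (die_b : List Int) (out : List (Int × Int)) : Prop := out = sum_combinations_alt die_a die_b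
instance (die_a : List Int) (die_b : List Int) (out : List (Int × Int)) : Decidable (Spec_sum_combinations die_a die_b out) := by unfold Spec_sum_combinations; infer_instance

-- ===== CLAIM (what is proved, stated in full; the proofs are below) =====
def Claim_equal_sum_combinations : Prop := ∀ (die_a : List Int) (die_b : List Int), Dom_sum_combinations die_a die_b → Spec_sum_combinations die_a die_b (sum_combinations die_a die_b)

-- ===== LEMMAS AND PROOFS =====

-- A's loop body ('if s in sums: sums[s] += 1 else: sums[s] = 1') is the unit-increment counter step.
theorem step_eq (d : PySem.Dict Int Int) (s : Int) :
    (if PySem.Dict.contains d s then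
        PySem.Dict.insert d s (PySem.Dict.getD d s 0 + 1)
      else PySem.Dict.insert d s 1)
      = PySem.Dict.insert d s (PySem.Dict.getD d s 0 + 1) := by
  by_cases h : PySem.Dict.contains d s
  · simp [h]
  · simp only [Bool.not_eq_true] at h
    rw [if_neg (by simp [h]), PySem.Dict.getD_of_not_contains]
    · norm_num
    · exact h

-- A's nested loop builds exactly Counter(flat) for the flattened list of pairwise sums.
theorem a_eq_counter (die_a die_b : List Int) :
    (die_a.foldl (fun sums a =>
      die_b.foldl (fun sums b =>
        let s := a + b
        if PySem.Dict.contains sums s then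
          PySem.Dict.insert sums s (PySem.Dict.getD sums s 0 + 1)
        else
          PySem.Dict.insert sums s 1) sums) PySem.Dict.empty)
      = PySem.Dict.counter (die_a.flatMap (fun a => die_b.map (fun b => a + b))) := by
  have hinner : ∀ a : Int,
      (fun (sums : PySem.Dict Int Int) (b : Int) =>
        if PySem.Dict.contains sums (a + b) then
          PySem.Dict.insert sums (a + b) (PySem.Dict.getD sums (a + b) 0 + 1)
        else PySem.Dict.insert sums (a + b) 1)
      = (fun (sums : PySem.Dict Int Int) (b : Int) =>
          PySem.Dict.insert sums (a + b) (PySem.Dict.getD sums (a + b) 0 + 1)) :=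
    fun a => funext fun d => funext fun b => step_eq d (a + b)
  simp only [hinner]
  rw [← PySem.Dict.foldl_insert_getD_add_one_eq_counter, List.foldl_flatMap]
  simp only [List.foldl_map]

-- getD after a loop of 'd[key(x)] = d.get(key(x), 0) + w(x)' increments.
theorem getD_inc_fold {α : Type} (l : List α) (keyf wf : α → Int) (d : PySem.Dict Int Int) (k : Int) :
    (l.foldl (fun d x => PySem.Dict.insert d (keyf x) (PySem.Dict.getD d (keyf x) 0 + wf x)) d).getD k 0
      = d.getD k 0 + (l.map (fun x => if keyf x = k then wf x else 0)).sum := by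
  induction l generalizing d with
  | nil => simp
  | cons x xs ih =>
    simp only [List.foldl_cons, List.map_cons, List.sum_cons, ih, PySem.Dict.getD_insert]
    by_cases h : k = keyf x
    · rw [if_pos h, if_pos h.symm, h]; ring
    · rw [if_neg h, if_neg (fun hh => h hh.symm)]; ring

-- getD after B's nested product loop.
theorem getD_nested (l1 l2 : List (Int × Int)) (d : PySem.Dict Int Int) (k : Int) :
    (l1.foldl (fun d p => l2.foldl (fun d q =>
        PySem.Dict.insert d (p.1 + q.1) (PySem.Dict.getD d (p.1 + q.1) 0 + p.2 * q.2)) d) d).getD k 0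
      = d.getD k 0
        + (l1.map (fun p => (l2.map (fun q => if p.1 + q.1 = k then p.2 * q.2 else 0)).sum)).sum := by
  induction l1 generalizing d with
  | nil => simp
  | cons p ps ih =>
    simp only [List.foldl_cons, List.map_cons, List.sum_cons, ih,
      getD_inc_fold l2 (fun q => p.1 + q.1) (fun q => p.2 * q.2)]
    ring

-- keys after B's nested product loop.
theorem keys_nested (l1 l2 : List (Int × Int)) (d : PySem.Dict Int Int) :
    (l1.foldl (fun d p => l2.foldl (fun d q =>
        PySem.Dict.insert d (p.1 + q.1) (PySem.Dict.getD d (p.1 + q.1) 0 + p.2 * q.2)) d) d).keys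
      = PySem.Set.update d.keys (l1.flatMap (fun p => l2.map (fun q => p.1 + q.1))) := by
  induction l1 generalizing d with
  | nil => simp [PySem.Set.update_nil]
  | cons p ps ih =>
    simp only [List.foldl_cons, List.flatMap_cons, ih,
      PySem.Dict.keys_foldl_insert_key l2 (fun q => p.1 + q.1), PySem.Set.update_append]

-- a set update adds nothing when every element is already present
theorem update_of_subset (s : PySem.Set Int) (ys : List Int) (h : ∀ x ∈ ys, x ∈ s) :
    PySem.Set.update s ys = s := by
  rw [PySem.Set.update_eq_append_filter]
  have hf : (PySem.Set.ofList ys).filter (fun y => !(PySem.Set.contains s y)) = [] := by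
    refine List.filter_eq_nil_iff.mpr (fun y hy => ?_)
    have hys : y ∈ s := h y ((PySem.Set.mem_ofList _ _).mp hy)
    simpa using hys
  rw [hf, List.append_nil]

-- set update only depends on the ordered dedup of the added list
theorem update_congr (s : PySem.Set Int) (xs ys : List Int)
    (h : PySem.Set.ofList xs = PySem.Set.ofList ys) :
    PySem.Set.update s xs = PySem.Set.update s ys := by
  rw [PySem.Set.update_eq_append_filter, PySem.Set.update_eq_append_filter, h]

-- mapping over the ordered dedup yields the same set as mapping over the list
theorem ofList_map_dedup (l : List Int) (f : Int → Int) :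
    PySem.Set.ofList ((PySem.List.dedup l).map f) = PySem.Set.ofList (l.map f) := by
  induction l using List.reverseRecOn with
  | nil => simp
  | append_singleton xs a ih =>
    rw [List.map_append, List.map_singleton, PySem.Set.ofList_append_singleton,
      PySem.List.dedup_eq_ofList, PySem.Set.ofList_append_singleton]
    rw [PySem.List.dedup_eq_ofList] at ih
    by_cases hm : a ∈ PySem.Set.ofList xs
    · rw [PySem.Set.add_of_mem hm, ih]
      rw [PySem.Set.add_of_mem]
      exact (PySem.Set.mem_ofList _ _).mpr (List.mem_map_of_mem ((PySem.Set.mem_ofList _ _).mp hm))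
    · rw [PySem.Set.add_of_not_mem hm, List.map_append, List.map_singleton,
        PySem.Set.ofList_append_singleton, ih]

-- update along a flatMap is a fold of updates
theorem update_flatMap (l : List Int) (g : Int → List Int) (s : PySem.Set Int) :
    PySem.Set.update s (l.flatMap g) = l.foldl (fun s a => PySem.Set.update s (g a)) s := by
  induction l generalizing s with
  | nil => simp [PySem.Set.update_nil]
  | cons a as ih => rw [List.flatMap_cons, PySem.Set.update_append, List.foldl_cons, ih]

-- the ordered dedup of the flattened products is unchanged if both factors are deduped first
theorem ofList_flatMap_dedup (l : List Int) (g : Int → List Int) :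
    PySem.Set.ofList ((PySem.List.dedup l).flatMap g) = PySem.Set.ofList (l.flatMap g) := by
  induction l using List.reverseRecOn with
  | nil => simp
  | append_singleton xs a ih =>
    rw [List.flatMap_append, PySem.Set.ofList_append, PySem.List.dedup_eq_ofList,
      PySem.Set.ofList_append_singleton]
    rw [PySem.List.dedup_eq_ofList] at ih
    by_cases hm : a ∈ PySem.Set.ofList xs
    · rw [PySem.Set.add_of_mem hm, ih]
      simp only [List.flatMap_cons, List.flatMap_nil, List.append_nil]
      refine (update_of_subset _ _ (fun x hx => ?_)).symm
      exact (PySem.Set.mem_ofList _ _).mpr (List.mem_flatMap.mpr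
        ⟨a, (PySem.Set.mem_ofList _ _).mp hm, hx⟩)
    · rw [PySem.Set.add_of_not_mem hm, List.flatMap_append, PySem.Set.ofList_append, ih]

-- key order: product over deduped lists yields the same ordered key set as the full product
theorem keys_eq (die_a die_b : List Int) :
    PySem.Set.ofList ((PySem.List.dedup die_a).flatMap
        (fun va => (PySem.List.dedup die_b).map (fun vb => va + vb)))
      = PySem.Set.ofList (die_a.flatMap (fun a => die_b.map (fun b => a + b))) := by
  have h1 : ∀ (l : List Int),
      PySem.Set.ofList (l.flatMap (fun va => (PySem.List.dedup die_b).map (fun vb => va + vb)))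
        = PySem.Set.ofList (l.flatMap (fun a => die_b.map (fun b => a + b))) := by
    intro l
    rw [← PySem.Set.update_nil_left, ← PySem.Set.update_nil_left, update_flatMap, update_flatMap]
    have : (fun (s : PySem.Set Int) (a : Int) =>
        PySem.Set.update s ((PySem.List.dedup die_b).map (fun vb => a + vb)))
        = (fun (s : PySem.Set Int) (a : Int) => PySem.Set.update s (die_b.map (fun b => a + b))) :=
      funext fun s => funext fun a => update_congr _ _ _ (ofList_map_dedup die_b (fun vb => a + vb))
    rw [this]
  rw [h1, ofList_flatMap_dedup]

-- summing an indicator over a duplicate-free list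
theorem sum_ite_of_nodup (l : List Int) (hn : l.Nodup) (a : Int) (h : Int → Int) :
    (l.map (fun v => if v = a then h v else 0)).sum = if a ∈ l then h a else 0 := by
  induction l with
  | nil => simp
  | cons v vs ih =>
    rcases List.nodup_cons.mp hn with ⟨hv, hvs⟩
    simp only [List.map_cons, List.sum_cons, ih hvs, List.mem_cons]
    rcases eq_or_ne v a with h1 | h1
    · subst h1
      rw [if_pos rfl, if_neg hv, if_pos (Or.inl rfl)]; ring
    · rw [if_neg h1]
      rcases Decidable.em (a ∈ vs) with h2 | h2
      · rw [if_pos h2, if_pos (Or.inr h2)]; ring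
      · rw [if_neg h2, if_neg (by rintro (rfl | hc) <;> [exact h1 rfl; exact h2 hc])]; ring

-- a sum over a list equals the multiplicity-weighted sum over its ordered dedup
theorem sum_over_dedup (l : List Int) (g : Int → Int) :
    (l.map g).sum = ((PySem.List.dedup l).map (fun v => (l.count v : Int) * g v)).sum := by
  induction l using List.reverseRecOn with
  | nil => simp
  | append_singleton xs a ih =>
    rw [List.map_append, List.map_singleton, List.sum_append, List.sum_singleton,
      PySem.List.dedup_eq_ofList, PySem.Set.ofList_append_singleton]
    rw [PySem.List.dedup_eq_ofList] at ih
    by_cases hm : a ∈ PySem.Set.ofList xs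
    · rw [PySem.Set.add_of_mem hm]
      have hcnt : ∀ v : Int, ((xs ++ [a]).count v : Int) * g v
          = (xs.count v : Int) * g v + (if v = a then g v else 0) := by
        intro v
        rw [List.count_append]
        rcases eq_or_ne v a with h1 | h1
        · subst h1
          rw [if_pos rfl]
          have : List.count v [v] = 1 := by simp
          rw [this]; push_cast; ring
        · rw [if_neg h1]
          have : List.count v [a] = 0 := by rw [List.count_singleton]; simp [h1.symm]
          rw [this]; push_cast; ring
      calc (xs.map g).sum + g a
          = ((PySem.Set.ofList xs).map (fun v => (xs.count v : Int) * g v)).sum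
            + ((PySem.Set.ofList xs).map (fun v => if v = a then g v else 0)).sum := by
            rw [← ih]
            congr 1
            rw [sum_ite_of_nodup _ (PySem.Set.nodup_ofList xs) a g, if_pos hm]
        _ = ((PySem.Set.ofList xs).map (fun v => ((xs ++ [a]).count v : Int) * g v)).sum := by
            rw [← List.sum_map_add]
            exact congrArg List.sum (List.map_congr_left (fun v _ => (hcnt v))).symm
    · rw [PySem.Set.add_of_not_mem hm, List.map_append, List.map_singleton,
        List.sum_append, List.sum_singleton]
      have h1 : ((PySem.Set.ofList xs).map (fun v => ((xs ++ [a]).count v : Int) * g v)).sum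
          = ((PySem.Set.ofList xs).map (fun v => (xs.count v : Int) * g v)).sum := by
        refine congrArg _ (List.map_congr_left (fun v hv => ?_))
        have hva : v ≠ a := fun hva => hm (hva ▸ hv)
        rw [List.count_append, List.count_singleton]
        simp [hva.symm]
      have h2 : ((xs ++ [a]).count a : Int) = 1 := by
        rw [List.count_append, List.count_eq_zero_of_not_mem
          (fun hc => hm ((PySem.Set.mem_ofList _ _).mpr hc))]
        simp
      rw [h1, h2, ih]; ring

-- counting one key in the flattened pairwise-sum list
theorem count_flat (die_a die_b : List Int) (k : Int) :
    ((die_a.flatMap (fun a => die_b.map (fun b => a + b))).count k : Int)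
      = (die_a.map (fun a => (die_b.count (k - a) : Int))).sum := by
  induction die_a with
  | nil => simp
  | cons a as ih =>
    rw [List.flatMap_cons, List.count_append, List.map_cons, List.sum_cons]
    have hinj : Function.Injective (fun b : Int => a + b) := fun x y hxy => by
      simpa using hxy
    have hmap : (die_b.map (fun b => a + b)).count k = die_b.count (k - a) := by
      have := List.count_map_of_injective (l := die_b) (f := fun b : Int => a + b) hinj (x := k - a)
      simpa using this
    rw [hmap]
    push_cast [ih]
    ring

-- a dict with duplicate-free keys is its key list paired with its lookups
theorem items_eq_map_keys (d : PySem.Dict Int Int) (h : d.keys.Nodup) :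
    d.items = d.keys.map (fun k => (k, d.getD k 0)) := by
  simp only [PySem.Dict.keys, List.map_map]
  conv_lhs => rw [← List.map_id d.items]
  refine List.map_congr_left (fun p hp => ?_)
  have : d.getD p.1 0 = p.2 := PySem.Dict.getD_of_mem_items d (by simpa using hp) h 0
  simp [this]

-- ===== VERDICT (by name: the statement is the Claim_ definition above) =====
theorem sum_combinations_spec : Claim_equal_sum_combinations := by
  intro die_a die_b _
  unfold Spec_sum_combinations sum_combinations sum_combinations_alt
  rw [a_eq_counter]
  simp only [PySem.Dict.foldl_insert_getD_add_one_eq_counter, PySem.Dict.items_counter]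
  have hkeys : (((PySem.Set.ofList die_a).map (fun k => (k, (List.count k die_a : Int)))).foldl
      (fun sums p => ((PySem.Set.ofList die_b).map (fun k => (k, (List.count k die_b : Int)))).foldl
        (fun sums q => PySem.Dict.insert sums (p.1 + q.1) (PySem.Dict.getD sums (p.1 + q.1) 0 + p.2 * q.2)) sums)
      PySem.Dict.empty).keys
      = PySem.Set.ofList (die_a.flatMap (fun a => die_b.map (fun b => a + b))) := by
    rw [keys_nested, PySem.Dict.keys_empty, PySem.Set.update_nil_left, List.flatMap_map]
    simp only [List.map_map, Function.comp_def]
    have := keys_eq die_a die_b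
    simpa [PySem.List.dedup_eq_ofList] using this
  rw [items_eq_map_keys _ (by rw [hkeys]; exact PySem.Set.nodup_ofList _), hkeys]
  refine List.map_congr_left (fun k hk => ?_)
  refine Prod.ext rfl ?_
  show (List.count k (die_a.flatMap (fun a => die_b.map (fun b => a + b))) : Int) = _
  rw [getD_nested, PySem.Dict.getD_empty, zero_add]
  simp only [List.map_map, Function.comp_def]
  have hinner : ∀ va : Int,
      ((PySem.Set.ofList die_b).map (fun vb =>
        if va + vb = k then (List.count va die_a : Int) * (List.count vb die_b : Int) else 0)).sum
      = (List.count va die_a : Int) * (List.count (k - va) die_b : Int) := by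
    intro va
    have h1 : ∀ vb : Int,
        (if va + vb = k then (List.count va die_a : Int) * (List.count vb die_b : Int) else 0)
        = (List.count va die_a : Int) * (if vb = k - va then (List.count vb die_b : Int) else 0) := by
      intro vb
      by_cases h : va + vb = k
      · rw [if_pos h, if_pos (by omega)]
      · rw [if_neg h, if_neg (by omega), mul_zero]
    rw [List.map_congr_left (fun vb _ => h1 vb), List.sum_map_mul_left,
      sum_ite_of_nodup _ (PySem.Set.nodup_ofList _) _ _]
    by_cases hmem : (k - va) ∈ PySem.Set.ofList die_b
    · rw [if_pos hmem]
    · rw [if_neg hmem, List.count_eq_zero_of_not_mem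
        (fun hc => hmem ((PySem.Set.mem_ofList _ _).mpr hc))]
      simp
  rw [List.map_congr_left (fun va _ => hinner va)]
  have := sum_over_dedup die_a (fun a => (List.count (k - a) die_b : Int))
  rw [PySem.List.dedup_eq_ofList] at this
  rw [← this, ← count_flat]
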